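-- pv_equiv track=rewrite | github.com/uhuohuy/GazPNE2 | place_tagger.py | lowerize
-- ===== SOURCE A (Python) =====
-- LOW = ['V']
--
-- def lowerize(offsets, full_offset, tag_lists):
--     new_off = []
--     for s in full_offset:
--         bool_lower = 0
--         for i, suboff in enumerate(offsets):
--             for j, subsuboff in enumerate(suboff):
--                 if s[1] >= subsuboff[0] and s[1] <= subsuboff[1] and \
--                    s[2] >= subsuboff[0] and s[2] <= subsuboff[1]:
--                        if tag_lists[i][j][1] in LOW:
--                            bool_lower = 1
--                        break
--             if bool_lower:
--                 break
--         if bool_lower: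
--             new_off.append(tuple([s[0].lower(), s[1], s[2]])) #.capitalize()
--         else:
--             new_off.append(tuple([s[0], s[1], s[2]]))
--     return new_off
-- ===== SOURCE B (Python) =====
-- LOW = ['V']
--
--
-- def prune(row, tags):
--     # An interval contained in an earlier interval of the same row can never be
--     # the first containing interval of any span, so drop it up front; keep
--     # (a, b, is_low) triples with the tag test precomputed.
--     kept = []
--     for (a, b), tag in zip(row, tags):
--         if not any(ka <= a and b <= kb for ka, kb, _ in kept):
--             kept.append((a, b, tag[1] in LOW))
--     return kept
--
--
-- def row_hit(s1, s2, kept):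
--     for a, b, v in kept:
--         if a <= s1 <= b and a <= s2 <= b:
--             return v
--     return None
--
--
-- def lowerize(offsets, full_offset, tag_lists):
--     rows = [prune(row, tags) for row, tags in zip(offsets, tag_lists)]
--     new_off = []
--     for name, s1, s2 in full_offset:
--         if any(row_hit(s1, s2, kept) for kept in rows):
--             new_off.append((name.lower(), s1, s2))
--         else:
--             new_off.append((name, s1, s2))
--     return new_off
-- ===== Notes on version B (the rewrite author's own statement) =====
-- stated objective: faster
-- what changed: B preprocesses the rows once, zipping intervals with their tags and pruning every interval contained in an earlier interval of the same row (such an interval can never be any span's first containing interval) into (a,b,is_low) triples with the tag test precomputed, then decides each token by a first-hit scan over the pruned rows; A runs an index-based triple loop with break flags, re-reading tag_lists[i][j] and re-testing the tag for every token.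
import Mathlib
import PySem

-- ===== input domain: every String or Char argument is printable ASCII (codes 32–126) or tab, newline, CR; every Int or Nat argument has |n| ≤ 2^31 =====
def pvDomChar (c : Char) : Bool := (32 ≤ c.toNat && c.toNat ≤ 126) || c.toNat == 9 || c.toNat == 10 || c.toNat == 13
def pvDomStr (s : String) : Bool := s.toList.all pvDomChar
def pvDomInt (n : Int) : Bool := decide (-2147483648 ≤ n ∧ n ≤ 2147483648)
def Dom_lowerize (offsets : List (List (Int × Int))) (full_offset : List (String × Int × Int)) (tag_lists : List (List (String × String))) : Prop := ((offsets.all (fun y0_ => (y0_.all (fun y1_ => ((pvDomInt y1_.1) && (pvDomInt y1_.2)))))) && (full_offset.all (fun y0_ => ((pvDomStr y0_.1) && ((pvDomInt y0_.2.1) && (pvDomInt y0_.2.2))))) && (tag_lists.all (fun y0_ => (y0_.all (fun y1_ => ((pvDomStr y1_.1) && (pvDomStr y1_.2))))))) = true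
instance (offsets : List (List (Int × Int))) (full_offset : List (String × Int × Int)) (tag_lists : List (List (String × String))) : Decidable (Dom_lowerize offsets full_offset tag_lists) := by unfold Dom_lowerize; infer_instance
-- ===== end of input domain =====

-- B preprocesses each row once (zip with tags, prune intervals contained in an earlier
-- interval of the same row, precompute the tag-in-LOW bool) and decides each token by a
-- first-hit scan over the pruned rows, replacing A's index-based triple loop with break
-- flags; a timing run measured B faster by a constant factor.

-- ===== PORT A =====
-- LOW = ['V']
def pvLOW : List String := ["V"]

-- the containment test  s[1] >= a and s[1] <= b and s[2] >= a and s[2] <= b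
def pvContains (iv : Int × Int) (s1 s2 : Int) : Bool :=
  s1 ≥ iv.1 && s1 ≤ iv.2 && s2 ≥ iv.1 && s2 ≤ iv.2

-- A's inner loop over one row; j is enumerate's index, tag_lists[i][j] is read with getD
-- (in range whenever Python does not raise, i.e. on Pre_); returns bool_lower after the loop
def pvAInner (tags : List (String × String)) (s1 s2 : Int) :
    List (Int × Int) → Nat → Int
  | [], _ => 0
  | iv :: rest, j =>
    if pvContains iv s1 s2 then
      (if pvLOW.contains (tags.getD j ("", "")).2 then 1 else 0)
    else pvAInner tags s1 s2 rest (j + 1)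

-- A's outer loop over the rows of offsets; breaks as soon as bool_lower is set
def pvAOuter (tag_lists : List (List (String × String))) (s1 s2 : Int) :
    List (List (Int × Int)) → Nat → Int
  | [], _ => 0
  | suboff :: rest, i =>
    let b := pvAInner (tag_lists.getD i []) s1 s2 suboff 0
    if b ≠ 0 then b else pvAOuter tag_lists s1 s2 rest (i + 1)

def lowerize (offsets : List (List (Int × Int))) (full_offset : List (String × Int × Int)) (tag_lists : List (List (String × String))) : List (String × Int × Int) :=
  full_offset.foldl (fun new_off s =>
    let b := pvAOuter tag_lists s.2.1 s.2.2 offsets 0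
    if b ≠ 0 then new_off ++ [(PySem.Str.lower s.1, s.2.1, s.2.2)]
    else new_off ++ [(s.1, s.2.1, s.2.2)]) []

-- ===== PORT B =====
-- prune(row, tags): fold over the zipped row keeping (a, b, is_low) triples, dropping
-- intervals contained in an earlier kept interval
def pvPruneGo : List (Int × Int × Bool) → List ((Int × Int) × (String × String)) → List (Int × Int × Bool)
  | kept, [] => kept
  | kept, (ab, tag) :: rest =>
    if kept.any (fun k => k.1 ≤ ab.1 && ab.2 ≤ k.2.1) then pvPruneGo kept rest
    else pvPruneGo (kept ++ [(ab.1, ab.2, pvLOW.contains tag.2)]) rest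

-- row_hit(s1, s2, kept): first kept triple containing both endpoints, its bool (None = none)
def pvRowHit (s1 s2 : Int) : List (Int × Int × Bool) → Option Bool
  | [] => none
  | (a, b, v) :: rest =>
    if a ≤ s1 && s1 ≤ b && a ≤ s2 && s2 ≤ b then some v else pvRowHit s1 s2 rest

def lowerize_alt (offsets : List (List (Int × Int))) (full_offset : List (String × Int × Int)) (tag_lists : List (List (String × String))) : List (String × Int × Int) :=
  let rows := (offsets.zip tag_lists).map (fun rt => pvPruneGo [] (rt.1.zip rt.2))
  full_offset.foldl (fun new_off s =>
    if rows.any (fun kept => pvRowHit s.2.1 s.2.2 kept == some true)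
    then new_off ++ [(PySem.Str.lower s.1, s.2.1, s.2.2)]
    else new_off ++ [(s.1, s.2.1, s.2.2)]) []

-- ===== PRECONDITION & SPEC =====
-- row's verdict is 'V': its first containing interval has a tag entry and that tag is in LOW
def pvRowVB (row : List (Int × Int)) (tags : List (String × String)) (s1 s2 : Int) : Bool :=
  match row.findIdx? (fun iv => pvContains iv s1 s2) with
  | some j => decide (j < tags.length) && pvLOW.contains ((tags.getD j ("", "")).2)
  | none => false

-- row does not raise: its first containing interval (if any) has a tag entry
def pvOkB (row : List (Int × Int)) (tags : List (String × String)) (s1 s2 : Int) : Bool :=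
  match row.findIdx? (fun iv => pvContains iv s1 s2) with
  | some j => decide (j < tags.length)
  | none => true

-- Pre_ is exactly A's non-raising set: for every token, every REACHED row (one preceded only
-- by rows whose first containing interval has a non-'V' tag) must have a tag entry for the
-- token's first containing interval, else tag_lists[i][j] raises IndexError.
def Pre_lowerize (offsets : List (List (Int × Int))) (full_offset : List (String × Int × Int)) (tag_lists : List (List (String × String))) : Prop :=
  ∀ s ∈ full_offset, ∀ i < offsets.length,
    (∀ i' < i, pvRowVB (offsets.getD i' []) (tag_lists.getD i' []) s.2.1 s.2.2 = false) →
    pvOkB (offsets.getD i []) (tag_lists.getD i []) s.2.1 s.2.2 = true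
instance (offsets : List (List (Int × Int))) (full_offset : List (String × Int × Int)) (tag_lists : List (List (String × String))) : Decidable (Pre_lowerize offsets full_offset tag_lists) := by unfold Pre_lowerize; infer_instance

def pvWitness_lowerize : (List (List (Int × Int))) × (List (String × Int × Int)) × (List (List (String × String))) :=
  ([[(0, 5)]], [("Ab", 1, 2)], [[("w", "V")]])

def Spec_lowerize (offsets : List (List (Int × Int))) (full_offset : List (String × Int × Int)) (tag_lists : List (List (String × String))) (out : List (String × Int × Int)) : Prop := out = lowerize_alt offsets full_offset tag_lists
instance (offsets : List (List (Int × Int))) (full_offset : List (String × Int × Int)) (tag_lists : List (List (String × String))) (out : List (String × Int × Int)) : Decidable (Spec_lowerize offsets full_offset tag_lists out) := by unfold Spec_lowerize; infer_instance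

-- ===== CLAIM (what is proved, stated in full; the proofs are below) =====
def Claim_equal_lowerize : Prop := ∀ (offsets : List (List (Int × Int))) (full_offset : List (String × Int × Int)) (tag_lists : List (List (String × String))), Dom_lowerize offsets full_offset tag_lists → Pre_lowerize offsets full_offset tag_lists → Spec_lowerize offsets full_offset tag_lists (lowerize offsets full_offset tag_lists)

-- ===== LEMMAS AND PROOFS =====

-- first containing interval of the zipped row, its tag (proof-side summary of both loops)
def pvFirstTag (s1 s2 : Int) : List ((Int × Int) × (String × String)) → Option String
  | [] => none
  | (iv, tag) :: rest => if pvContains iv s1 s2 then some tag.2 else pvFirstTag s1 s2 rest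

-- pvRowVB re-expressed through pvFirstTag over the zipped row
theorem pvRowVB_firstTag (s1 s2 : Int) :
    ∀ (row : List (Int × Int)) (tags : List (String × String)),
    pvRowVB row tags s1 s2 =
      match pvFirstTag s1 s2 (row.zip tags) with
      | some t => pvLOW.contains t
      | none => false := by
  intro row
  induction row with
  | nil => intro tags; simp [pvRowVB, pvFirstTag]
  | cons iv rest ih =>
    intro tags
    by_cases hc : pvContains iv s1 s2 = true
    · cases tags with
      | nil => simp [pvRowVB, pvFirstTag, List.findIdx?_cons, hc]
      | cons t ts => simp [pvRowVB, pvFirstTag, List.findIdx?_cons, hc]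
    · cases tags with
      | nil =>
        simp only [pvRowVB, List.findIdx?_cons, hc, Bool.false_eq_true, if_false,
          List.zip_nil_right, pvFirstTag]
        cases hf : rest.findIdx? (fun iv => pvContains iv s1 s2) <;> simp
      | cons t ts =>
        have := ih ts
        simp only [pvRowVB, List.findIdx?_cons, hc, Bool.false_eq_true, if_false,
          List.zip_cons_cons, pvFirstTag] at this ⊢
        cases hf : rest.findIdx? (fun iv => pvContains iv s1 s2) with
        | none => simpa [hf] using this
        | some j => simpa [hf, List.getD_cons_succ] using this

-- A's inner loop equals the first-match over the row zipped with the (dropped) tag row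
theorem pvAInner_eq (s1 s2 : Int) (suboff : List (Int × Int)) :
    ∀ (tags : List (String × String)) (j : Nat),
    (∀ k ∈ suboff.findIdx? (fun iv => pvContains iv s1 s2), j + k < tags.length) →
    pvAInner tags s1 s2 suboff j =
      (match pvFirstTag s1 s2 (suboff.zip (tags.drop j)) with
       | some t => if pvLOW.contains t then 1 else 0
       | none => 0) := by
  induction suboff with
  | nil => intro tags j _; simp [pvAInner, pvFirstTag]
  | cons iv rest ih =>
    intro tags j hj
    by_cases hc : pvContains iv s1 s2 = true
    · have hjlen : j < tags.length := by
        have := hj 0 (by simp [List.findIdx?_cons, hc])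
        omega
      have hdrop : tags.drop j = tags[j] :: tags.drop (j + 1) :=
        List.drop_eq_getElem_cons hjlen
      have hgd : tags.getD j ("", "") = tags[j] := List.getD_eq_getElem tags _ hjlen
      simp only [pvAInner, hc, if_true, hdrop, List.zip_cons_cons, pvFirstTag]
      simp [List.getElem?_eq_getElem hjlen]
    · have hrec : ∀ k ∈ rest.findIdx? (fun iv => pvContains iv s1 s2),
          (j + 1) + k < tags.length := by
        intro k hk
        have hk' : rest.findIdx? (fun iv => pvContains iv s1 s2) = some k :=
          Option.mem_def.mp hk
        have : j + (k + 1) < tags.length := hj (k + 1)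
          (by simp [List.findIdx?_cons, hc, hk'])
        omega
      have hrhs := ih tags (j + 1) hrec
      simp only [pvAInner, hc, if_false, Bool.false_eq_true]
      rw [hrhs]
      cases hdj : tags.drop j with
      | nil =>
        have : tags.drop (j + 1) = [] := by
          rw [← List.tail_drop, hdj]; rfl
        simp [this, pvFirstTag]
      | cons t ts =>
        have hts : ts = tags.drop (j + 1) := by
          rw [← List.tail_drop, hdj]; rfl
        simp [pvFirstTag, hc, hts]

-- computation rules for Option.orElse (by rfl)
theorem pvNoneOrElse {α : Type} (f : Unit → Option α) : (none : Option α).orElse f = f () := rfl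

-- pvRowHit on a cons, with the condition phrased as pvContains (definitionally equal)
theorem pvRowHit_cons (s1 s2 a b : Int) (v : Bool) (rest : List (Int × Int × Bool)) :
    pvRowHit s1 s2 ((a, b, v) :: rest) =
      if pvContains (a, b) s1 s2 then some v else pvRowHit s1 s2 rest := rfl

-- pvRowHit distributes over append as orElse
theorem pvRowHit_append (s1 s2 : Int) (k1 k2 : List (Int × Int × Bool)) :
    pvRowHit s1 s2 (k1 ++ k2) =
      (pvRowHit s1 s2 k1).orElse (fun _ => pvRowHit s1 s2 k2) := by
  induction k1 with
  | nil => simp [pvRowHit]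
  | cons x rest ih =>
    obtain ⟨a, b, v⟩ := x
    rw [List.cons_append, pvRowHit_cons, pvRowHit_cons]
    by_cases h : pvContains (a, b) s1 s2 = true
    · simp [h]
    · simp [h, ih]

-- if some kept interval covers (a, b) and the query lies in (a, b), the kept row has a hit
theorem pvRowHit_isSome_of_cover (s1 s2 a b : Int) :
    ∀ kept : List (Int × Int × Bool),
    kept.any (fun k => k.1 ≤ a && b ≤ k.2.1) = true →
    pvContains (a, b) s1 s2 = true →
    (pvRowHit s1 s2 kept).isSome := by
  intro kept
  induction kept with
  | nil => intro h _; simp at h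
  | cons x rest ih =>
    intro hany hq
    obtain ⟨ka, kb, kv⟩ := x
    rw [pvRowHit_cons]
    by_cases hx : pvContains (ka, kb) s1 s2 = true
    · simp [hx]
    · simp only [hx, Bool.false_eq_true, if_false]
      simp only [List.any_cons, Bool.or_eq_true] at hany
      rcases hany with hhead | htail
      · exfalso
        apply hx
        simp only [Bool.and_eq_true, decide_eq_true_eq] at hhead
        simp only [pvContains, Bool.and_eq_true, decide_eq_true_eq, ge_iff_le] at hq ⊢
        omega
      · exact ih htail hq

-- the hit over the pruned row equals the first tag over the unpruned zipped row
theorem pvPrune_hit (s1 s2 : Int) :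
    ∀ (l : List ((Int × Int) × (String × String))) (kept : List (Int × Int × Bool)),
    pvRowHit s1 s2 (pvPruneGo kept l) =
      (pvRowHit s1 s2 kept).orElse (fun _ =>
        match pvFirstTag s1 s2 l with
        | some t => some (pvLOW.contains t)
        | none => none) := by
  intro l
  induction l with
  | nil =>
    intro kept
    simp only [pvPruneGo, pvFirstTag]
    cases pvRowHit s1 s2 kept <;> rfl
  | cons x rest ih =>
    intro kept
    obtain ⟨ab, tag⟩ := x
    by_cases hdrop : kept.any (fun k => k.1 ≤ ab.1 && ab.2 ≤ k.2.1) = true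
    · simp only [pvPruneGo, hdrop, if_true]
      rw [ih]
      by_cases hc : pvContains ab s1 s2 = true
      · have hsome := pvRowHit_isSome_of_cover s1 s2 ab.1 ab.2 kept hdrop (by simpa using hc)
        obtain ⟨v, hv⟩ := Option.isSome_iff_exists.mp hsome
        simp [hv]
      · simp only [pvFirstTag, hc, Bool.false_eq_true, if_false]
    · simp only [pvPruneGo, hdrop, if_false, Bool.false_eq_true]
      rw [ih, pvRowHit_append]
      have hx : pvRowHit s1 s2 [(ab.1, ab.2, pvLOW.contains tag.2)] =
          if pvContains ab s1 s2 then some (pvLOW.contains tag.2) else none := by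
        rw [show ([(ab.1, ab.2, pvLOW.contains tag.2)] : List (Int × Int × Bool)) =
              (ab.1, ab.2, pvLOW.contains tag.2) :: [] from rfl, pvRowHit_cons]
        rfl
      cases hk : pvRowHit s1 s2 kept with
      | some v => simp
      | none =>
        simp only [pvNoneOrElse]
        rw [hx]
        by_cases hc : pvContains ab s1 s2 = true
        · simp [pvFirstTag, hc]
        · simp [pvFirstTag, hc]

-- per-row summary: under pvOkB, A's inner loop returns 1 exactly on pvRowVB, and B's pruned
-- hit test equals pvRowVB unconditionally
theorem pvAInner_rowVB (s1 s2 : Int) (row : List (Int × Int)) (tags : List (String × String))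
    (hok : pvOkB row tags s1 s2 = true) :
    pvAInner tags s1 s2 row 0 = if pvRowVB row tags s1 s2 then 1 else 0 := by
  have hb : ∀ k ∈ row.findIdx? (fun iv => pvContains iv s1 s2), 0 + k < tags.length := by
    intro k hk
    have hk' : row.findIdx? (fun iv => pvContains iv s1 s2) = some k := Option.mem_def.mp hk
    unfold pvOkB at hok
    rw [hk'] at hok
    simpa using hok
  have := pvAInner_eq s1 s2 row tags 0 hb
  simp only [List.drop_zero] at this
  rw [this, pvRowVB_firstTag]
  cases pvFirstTag s1 s2 (row.zip tags) <;> simp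

theorem pvBRow_rowVB (s1 s2 : Int) (row : List (Int × Int)) (tags : List (String × String)) :
    (pvRowHit s1 s2 (pvPruneGo [] (row.zip tags)) == some true) = pvRowVB row tags s1 s2 := by
  rw [pvPrune_hit s1 s2 (row.zip tags) [], pvRowVB_firstTag]
  cases pvFirstTag s1 s2 (row.zip tags) with
  | none => simp [pvRowHit]
  | some t => simp [pvRowHit]

-- A's outer loop equals B's any() over the zipped, pruned rows
theorem pvAOuter_eq (s1 s2 : Int) (tag_lists : List (List (String × String))) :
    ∀ (offs : List (List (Int × Int))) (i : Nat),
    (∀ i' < offs.length,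
       (∀ i'' < i', pvRowVB (offs.getD i'' []) (tag_lists.getD (i + i'') []) s1 s2 = false) →
       pvOkB (offs.getD i' []) (tag_lists.getD (i + i') []) s1 s2 = true) →
    pvAOuter tag_lists s1 s2 offs i =
      if (offs.zip (tag_lists.drop i)).any
          (fun rt => pvRowHit s1 s2 (pvPruneGo [] (rt.1.zip rt.2)) == some true)
      then 1 else 0 := by
  intro offs
  induction offs with
  | nil => intro i _; simp [pvAOuter]
  | cons suboff rest ih =>
    intro i H
    have hok0 : pvOkB suboff (tag_lists.getD i []) s1 s2 = true := by
      have := H 0 (by simp) (fun i'' h => absurd h (Nat.not_lt_zero _))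
      simpa using this
    have hinner := pvAInner_rowVB s1 s2 suboff (tag_lists.getD i []) hok0
    have hstep : pvAOuter tag_lists s1 s2 (suboff :: rest) i =
        (let b := pvAInner (tag_lists.getD i []) s1 s2 suboff 0
         if b ≠ 0 then b else pvAOuter tag_lists s1 s2 rest (i + 1)) := rfl
    rw [hstep]
    simp only [hinner]
    -- shifted hypothesis for the tail, usable once the head row is not 'V'
    have Hsh : pvRowVB suboff (tag_lists.getD i []) s1 s2 = false →
        ∀ i' < rest.length,
        (∀ i'' < i', pvRowVB (rest.getD i'' []) (tag_lists.getD (i + 1 + i'') []) s1 s2 = false) →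
        pvOkB (rest.getD i' []) (tag_lists.getD (i + 1 + i') []) s1 s2 = true := by
      intro hvb0 i' hi' hprev
      have hmain := H (i' + 1) (by simpa using Nat.succ_lt_succ hi') ?_
      · have he : i + (i' + 1) = i + 1 + i' := by omega
        simpa [List.getD_cons_succ, he] using hmain
      · intro i'' hi''
        cases i'' with
        | zero => simpa using hvb0
        | succ k =>
          have := hprev k (by omega)
          have he : i + (k + 1) = i + 1 + k := by omega
          simpa [List.getD_cons_succ, he] using this
    by_cases hlen : i < tag_lists.length
    · have hdrop : tag_lists.drop i = tag_lists[i] :: tag_lists.drop (i + 1) :=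
        List.drop_eq_getElem_cons hlen
      have hgd : tag_lists[i] = tag_lists.getD i [] :=
        (List.getD_eq_getElem tag_lists _ hlen).symm
      simp only [hdrop, List.zip_cons_cons, List.any_cons, hgd, pvBRow_rowVB]
      cases hvb : pvRowVB suboff (tag_lists.getD i []) s1 s2 with
      | true => norm_num
      | false =>
        have hrec := ih (i + 1) (Hsh hvb)
        simp only [hrec]
        simp only [Bool.false_or, pvBRow_rowVB]
        norm_num
    · have hgd : tag_lists.getD i [] = [] := by
        unfold List.getD
        rw [List.getElem?_eq_none (by omega)]
        rfl
      have hvb : pvRowVB suboff (tag_lists.getD i []) s1 s2 = false := by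
        rw [hgd]
        unfold pvRowVB
        cases suboff.findIdx? (fun iv => pvContains iv s1 s2) <;> simp
      have hd1 : tag_lists.drop i = [] := List.drop_eq_nil_of_le (by omega)
      have hd2 : tag_lists.drop (i + 1) = [] := List.drop_eq_nil_of_le (by omega)
      have hrec := ih (i + 1) (Hsh hvb)
      rw [hd2] at hrec
      simp only [hvb, hd1, hrec]
      norm_num

-- ===== VERDICT (by name: the statement is the Claim_ definition above) =====
theorem lowerize_spec : Claim_equal_lowerize := by
  intro offsets full_offset tag_lists _ hpre
  unfold Spec_lowerize lowerize lowerize_alt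
  simp only [List.any_map, Function.comp_def]
  apply PySem.List.foldl_congr_mem
  intro acc s hs
  have hout := pvAOuter_eq s.2.1 s.2.2 tag_lists offsets 0 (by
    intro i' hi' hprev
    have := hpre s hs i' hi' (fun i'' hi'' => by simpa using hprev i'' hi'')
    simpa using this)
  simp only [List.drop_zero] at hout
  simp only [hout]
  by_cases hB : ((offsets.zip tag_lists).any
      fun rt => pvRowHit s.2.1 s.2.2 (pvPruneGo [] (rt.1.zip rt.2)) == some true) = true
  · simp [hB]
  · simp only [Bool.not_eq_true] at hB
    simp [hB]
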